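-- pv_equiv track=rewrite | github.com/hrshAnand/TextCompressor | main.py | greedyCompress
-- ===== SOURCE A (Python) =====
-- intSize = 2  # In bytes
--
-- def getMemorySaved(texts):
--     count = {}
--
--     for text in texts:
--         windowSize = intSize
--         while(windowSize < 20):
--             for i in range(len(text)-windowSize):
--                 phase = text[i:i+windowSize]
--                 if len(phase) > intSize:
--                     try:
--                         count[phase] += 1
--                     except KeyError:
--                         count[phase] = 1
--             windowSize += 1
--
--     memSaved = {}
--
--     for phase in count:
--         if count[phase] * (len(phase) - intSize) - len(phase) > 0:
--             memSaved[phase] = count[phase] * \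
--                 (len(phase) - intSize) - len(phase)
--
--     return memSaved
--
-- def greedyCompress(texts):
--     memSaved = getMemorySaved(texts)
--     mx = 0
--     bestPhase = ""
--
--     for phase in memSaved:
--         if(memSaved[phase] > mx):
--             mx = memSaved[phase]
--             bestPhase = phase
--
--     if mx > 0:
--         newTexts = []
--
--         for text in texts:
--             newTexts += text.split(bestPhase)
--
--         saved, phases = greedyCompress(newTexts)
--
--         return mx + saved, phases + [bestPhase]
--
--     return 0, []
-- ===== SOURCE B (Python) =====
-- intSize = 2  # In bytes
--
-- def greedyCompress(texts):
--     # iterative accumulator loop; counting done over a flat phrase generator,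
--     # savings via a dict comprehension, best phrase via max(..., key=...)
--     total = 0
--     phases = []
--     while True:
--         count = {}
--         for p in (t[i:i + w] for t in texts
--                   for w in range(intSize + 1, 20)
--                   for i in range(len(t) - w)):
--             count[p] = count.get(p, 0) + 1
--         memSaved = {p: c * (len(p) - intSize) - len(p)
--                     for p, c in count.items()
--                     if c * (len(p) - intSize) - len(p) > 0}
--         if not memSaved:
--             return total, phases
--         bestPhase, mx = max(memSaved.items(), key=lambda kv: kv[1])
--         total += mx
--         phases.insert(0, bestPhase)
--         texts = [piece for t in texts for piece in t.split(bestPhase)]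
-- ===== Notes on version B (the rewrite author's own statement) =====
-- stated objective: alternative
-- what changed: A's recursion is replaced by an iterative accumulator loop, and each pass is decomposed differently: substrings are counted in one pass over a flat generator of windows (instead of A's triple nested loop with try/except), the savings table is a dict comprehension, the best phrase is picked with max(items, key=...) (first maximum, matching A's strict-> scan), and texts are rewritten with a flat list comprehension.
import Mathlib
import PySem

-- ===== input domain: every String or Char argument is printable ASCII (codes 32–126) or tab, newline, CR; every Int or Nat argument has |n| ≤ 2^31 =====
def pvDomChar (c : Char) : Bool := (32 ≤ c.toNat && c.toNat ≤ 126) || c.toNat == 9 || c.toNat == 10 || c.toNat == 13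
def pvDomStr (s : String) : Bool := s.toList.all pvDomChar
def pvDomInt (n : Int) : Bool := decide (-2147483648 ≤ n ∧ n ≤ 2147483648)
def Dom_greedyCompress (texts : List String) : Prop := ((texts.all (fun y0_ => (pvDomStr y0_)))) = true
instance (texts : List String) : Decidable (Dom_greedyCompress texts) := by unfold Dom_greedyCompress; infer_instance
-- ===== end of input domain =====

-- B replaces A's recursion by an iterative accumulator loop and decomposes each pass differently
-- (flat window generator + single counting pass, dict comprehension, max with key); objective: alternative decomposition.

-- ===== PORT A =====
-- intSize = 2 (module constant, shared by both ports)
def pvIntSize : Int := 2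

-- A's getMemorySaved: triple nested loop with try/except counting, then a filtered dict
def pvGetMemorySaved (texts : List String) : PySem.Dict String Int :=
  let count : PySem.Dict String Int :=
    texts.foldl (fun count text =>
      (PySem.List.pyRange pvIntSize 20 1).foldl (fun count windowSize =>
        (PySem.List.pyRange 0 (PySem.Str.len text - windowSize) 1).foldl (fun count i =>
          let phase := PySem.Str.slice text (some i) (some (i + windowSize))
          if PySem.Str.len phase > pvIntSize then
            -- try: count[phase] += 1  except KeyError: count[phase] = 1
            count.insert phase (count.getD phase 0 + 1)
          else count) count) count) PySem.Dict.empty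
  count.items.foldl (fun memSaved kv =>
    if kv.2 * (PySem.Str.len kv.1 - pvIntSize) - PySem.Str.len kv.1 > 0 then
      memSaved.insert kv.1 (kv.2 * (PySem.Str.len kv.1 - pvIntSize) - PySem.Str.len kv.1)
    else memSaved) PySem.Dict.empty

-- fuel bound for the recursion / loop (each pass with mx > 0 strictly shrinks the total text
-- length); a pure totality guard, never reached on inputs where the Python recursion unfolds
def pvFuel (texts : List String) : Nat :=
  texts.foldl (fun a t => a + t.toList.length) 0 + 1

-- A's recursive greedyCompress
def pvGoA : Nat → List String → Int × List String
  | 0, _ => (0, [])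
  | fuel+1, texts =>
    let memSaved := pvGetMemorySaved texts
    -- for phase in memSaved: if memSaved[phase] > mx: …
    let best := memSaved.items.foldl (fun (p : Int × String) kv =>
        if kv.2 > p.1 then (kv.2, kv.1) else p) (0, "")
    if best.1 > 0 then
      -- newTexts += text.split(bestPhase)  (bestPhase ≠ "" whenever this branch runs, so getD never fires)
      let newTexts := texts.foldl (fun acc text =>
          acc ++ (PySem.Str.split? text best.2).getD [text]) []
      let r := pvGoA fuel newTexts
      (best.1 + r.1, r.2 ++ [best.2])
    else (0, [])

def greedyCompress (texts : List String) : Int × List String :=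
  pvGoA (pvFuel texts) texts

-- ===== PORT B =====
-- the flat generator of all windows longer than intSize (B's inner generator expression)
def pvAltPhrases (texts : List String) : List String :=
  texts.flatMap (fun t =>
    (PySem.List.pyRange (pvIntSize + 1) 20 1).flatMap (fun w =>
      (PySem.List.pyRange 0 (PySem.Str.len t - w) 1).map (fun i =>
        PySem.Str.slice t (some i) (some (i + w)))))

-- one pass of B's loop: count (count[p] = count.get(p,0)+1 over the generator), the
-- dict-comprehension savings table, and max(memSaved.items(), key=val) (none ↔ memSaved empty)
def pvAltStep (texts : List String) : Option (String × Int) :=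
  let count := PySem.Dict.counter (pvAltPhrases texts)
  let memSaved := PySem.Dict.ofList
    ((count.items.filter (fun kv =>
        kv.2 * (PySem.Str.len kv.1 - pvIntSize) - PySem.Str.len kv.1 > 0)).map (fun kv =>
      (kv.1, kv.2 * (PySem.Str.len kv.1 - pvIntSize) - PySem.Str.len kv.1)))
  PySem.List.max? memSaved.items (fun kv => kv.2)

-- B's while-True loop with accumulators total and phases (phases.insert(0, bestPhase))
def pvAltLoop : Nat → List String → Int → List String → Int × List String
  | 0, _, total, phases => (total, phases)
  | fuel+1, texts, total, phases =>
    match pvAltStep texts with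
    | none => (total, phases)
    | some best =>
      pvAltLoop fuel
        (texts.flatMap (fun t => (PySem.Str.split? t best.1).getD [t]))
        (total + best.2) (best.1 :: phases)

def greedyCompress_alt (texts : List String) : Int × List String :=
  pvAltLoop (pvFuel texts) texts 0 []

-- ===== PRECONDITION & SPEC =====
def Spec_greedyCompress (texts : List String) (out : Int × List String) : Prop := out = greedyCompress_alt texts
instance (texts : List String) (out : Int × List String) : Decidable (Spec_greedyCompress texts out) := by unfold Spec_greedyCompress; infer_instance

-- ===== CLAIM (what is proved, stated in full; the proofs are below) =====
def Claim_equal_greedyCompress : Prop := ∀ (texts : List String), Dom_greedyCompress texts → Spec_greedyCompress texts (greedyCompress texts)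

-- ===== LEMMAS AND PROOFS =====

-- a full-length window slice has the window's length
theorem pvLenSliceWindow (t : String) (w i : Int) (hw : 0 ≤ w) (hi : 0 ≤ i)
    (hiw : i + w ≤ PySem.Str.len t) :
    PySem.Str.len (PySem.Str.slice t (some i) (some (i + w))) = w := by
  rw [PySem.Str.len_eq] at hiw ⊢
  rw [PySem.Str.slice, String.toList_ofList, PySem.Chars.slice_eq_listSlice,
    PySem.List.length_slice]
  simp only [PySem.List.clampIdx]
  split_ifs <;> omega

-- A's counting loops compute Counter(pvAltPhrases texts)
theorem pvCount_eq (texts : List String) :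
    texts.foldl (fun count text =>
      (PySem.List.pyRange pvIntSize 20 1).foldl (fun count windowSize =>
        (PySem.List.pyRange 0 (PySem.Str.len text - windowSize) 1).foldl (fun count i =>
          let phase := PySem.Str.slice text (some i) (some (i + windowSize))
          if PySem.Str.len phase > pvIntSize then
            count.insert phase (count.getD phase 0 + 1)
          else count) count) count) PySem.Dict.empty
    = PySem.Dict.counter (pvAltPhrases texts) := by
  delta pvIntSize
  simp only [PySem.Dict.counter, pvAltPhrases, List.foldl_flatMap, List.foldl_map]
  refine PySem.List.foldl_congr_mem _ _ _ _ ?_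
  intro d text _
  rw [PySem.List.pyRange_one_cons (by norm_num : (2:Int) < 20)]
  simp only [List.foldl_cons]
  have h2 : (PySem.List.pyRange 0 (PySem.Str.len text - 2) 1).foldl (fun count i =>
      if PySem.Str.len (PySem.Str.slice text (some i) (some (i + 2))) > 2 then
        count.insert (PySem.Str.slice text (some i) (some (i + 2)))
          (count.getD (PySem.Str.slice text (some i) (some (i + 2))) 0 + 1)
      else count) d = d := by
    rw [PySem.List.foldl_congr_mem _ _ (fun (c : PySem.Dict String Int) (_ : Int) => c) d ?_]
    · exact List.foldl_fixed _
    · intro acc i hi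
      rw [PySem.List.mem_pyRange_one] at hi
      have hl := pvLenSliceWindow text 2 i (by norm_num) hi.1 (by omega)
      rw [hl]
      norm_num
  rw [h2]
  refine PySem.List.foldl_congr_mem _ _ _ _ ?_
  intro acc w hw
  rw [PySem.List.mem_pyRange_one] at hw
  refine PySem.List.foldl_congr_mem _ _ _ _ ?_
  intro c i hi
  rw [PySem.List.mem_pyRange_one] at hi
  have hl := pvLenSliceWindow text w i (by omega) hi.1 (by omega)
  rw [hl, if_pos (show w > 2 by omega)]
  rfl

-- a fold of conditional fresh inserts appends the filtered-mapped pairs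
theorem pvCondInsert_items (f : String × Int → Int) :
    ∀ (l : List (String × Int)) (d : PySem.Dict String Int),
      (∀ kv ∈ l, d.contains kv.1 = false) → (l.map Prod.fst).Nodup →
      (l.foldl (fun d kv => if f kv > 0 then d.insert kv.1 (f kv) else d) d).items
        = d.items ++ (l.filter (fun kv => f kv > 0)).map (fun kv => (kv.1, f kv)) := by
  intro l
  induction l with
  | nil => intro d _ _; simp
  | cons kv t ih =>
    intro d hc hnd
    have hfresh : d.contains kv.1 = false := hc kv (List.mem_cons_self)
    have hitems : (d.insert kv.1 (f kv)).items = d.items ++ [(kv.1, f kv)] :=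
      PySem.Dict.items_insert_of_not_contains d _ hfresh
    have hndt : (t.map Prod.fst).Nodup := by
      rw [List.map_cons, List.nodup_cons] at hnd
      exact hnd.2
    simp only [List.foldl_cons]
    by_cases h : f kv > 0
    · rw [if_pos h]
      have hck : ∀ p ∈ t, (d.insert kv.1 (f kv)).contains p.1 = false := by
        intro p hp
        rw [PySem.Dict.contains_eq_decide_mem_keys]
        have h1 : d.contains p.1 = false := hc p (List.mem_cons_of_mem _ hp)
        rw [PySem.Dict.contains_eq_decide_mem_keys] at h1
        have h2 : p.1 ≠ kv.1 := by
          rw [List.map_cons, List.nodup_cons] at hnd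
          intro hEq
          exact hnd.1 (hEq ▸ List.mem_map_of_mem hp)
        simp only [PySem.Dict.keys, hitems, List.map_append] at *
        simp at h1 ⊢
        exact ⟨h1, h2⟩
      rw [ih _ hck hndt, hitems]
      simp [h]
    · rw [if_neg h]
      rw [ih _ (fun p hp => hc p (List.mem_cons_of_mem _ hp)) hndt]
      simp [h]

-- the key column of Counter(xs).items has no duplicates
theorem pvCounterKeysNodup (xs : List String) :
    ((PySem.Dict.counter xs).items.map Prod.fst).Nodup := by
  rw [PySem.Dict.items_counter]
  simp [List.map_map, Function.comp_def]

-- B's pair list (the dict comprehension, as a list)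
def pvPairs (texts : List String) : List (String × Int) :=
  ((PySem.Dict.counter (pvAltPhrases texts)).items.filter (fun kv =>
      kv.2 * (PySem.Str.len kv.1 - pvIntSize) - PySem.Str.len kv.1 > 0)).map (fun kv =>
    (kv.1, kv.2 * (PySem.Str.len kv.1 - pvIntSize) - PySem.Str.len kv.1))

-- keys of the pair list are still distinct
theorem pvPairsKeysNodup (texts : List String) : ((pvPairs texts).map Prod.fst).Nodup := by
  unfold pvPairs
  rw [List.map_map]
  have hsub : (((PySem.Dict.counter (pvAltPhrases texts)).items.filter (fun kv =>
      kv.2 * (PySem.Str.len kv.1 - pvIntSize) - PySem.Str.len kv.1 > 0)).map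
        (Prod.fst ∘ (fun kv => (kv.1, kv.2 * (PySem.Str.len kv.1 - pvIntSize) - PySem.Str.len kv.1)))).Sublist
      ((PySem.Dict.counter (pvAltPhrases texts)).items.map Prod.fst) := by
    simpa [Function.comp_def] using List.Sublist.map Prod.fst (List.filter_sublist
      (p := fun kv => decide (kv.2 * (PySem.Str.len kv.1 - pvIntSize) - PySem.Str.len kv.1 > 0))
      (l := (PySem.Dict.counter (pvAltPhrases texts)).items))
  exact (pvCounterKeysNodup (pvAltPhrases texts)).sublist hsub

-- building a dict from pairs with distinct keys yields exactly those items
theorem pvOfList_items (pairs : List (String × Int)) (hnd : (pairs.map Prod.fst).Nodup) :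
    (PySem.Dict.ofList pairs).items = pairs := by
  simp only [PySem.Dict.ofList, PySem.Dict.update]
  rw [PySem.Dict.items_foldl_insert_fresh pairs Prod.fst Prod.snd _ (by simp) hnd]
  simp [PySem.Dict.empty]

-- A's memSaved dict holds exactly B's pair list
theorem pvMemSaved_items_eq (texts : List String) :
    (pvGetMemorySaved texts).items = pvPairs texts := by
  unfold pvGetMemorySaved pvPairs
  rw [pvCount_eq]
  rw [pvCondInsert_items (fun kv => kv.2 * (PySem.Str.len kv.1 - pvIntSize) - PySem.Str.len kv.1)
    _ _ (by simp) (pvCounterKeysNodup _)]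
  simp [PySem.Dict.empty]

-- A's strict-> scan, generalized start, is the running max kept as a swapped pair
theorem pvFoldSwap (l : List (String × Int)) :
    ∀ (m : String × Int),
      l.foldl (fun (p : Int × String) kv => if kv.2 > p.1 then (kv.2, kv.1) else p) (m.2, m.1)
        = ((l.foldl (fun m kv => if m.2 < kv.2 then kv else m) m).2,
           (l.foldl (fun m kv => if m.2 < kv.2 then kv else m) m).1) := by
  induction l with
  | nil => intro m; rfl
  | cons kv t ih =>
    intro m
    simp only [List.foldl_cons]
    by_cases h : m.2 < kv.2
    · simp only [if_pos h]
      exact ih kv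
    · simp only [if_neg h]
      exact ih m

-- max?(kv :: t, key=value) is the plain running max started at kv
theorem pvMax?_cons (t : List (String × Int)) :
    ∀ (kv : String × Int),
      PySem.List.max? (kv :: t) (fun kv => kv.2)
        = some (t.foldl (fun m x => if m.2 < x.2 then x else m) kv) := by
  induction t with
  | nil => intro kv; rfl
  | cons x t ih =>
    intro kv
    have hx := ih x
    have hkv := ih kv
    simp only [PySem.List.max?, List.foldl_cons] at hx hkv ⊢
    by_cases h : kv.2 < x.2
    · simp only [if_pos h]
      exact hx
    · simp only [if_neg h]
      exact hkv

-- A's strict-> scan over a list of positive-valued pairs is max?-with-key, swapped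
theorem pvBest_eq_max? (l : List (String × Int)) (hpos : ∀ kv ∈ l, 0 < kv.2) :
    l.foldl (fun (p : Int × String) kv => if kv.2 > p.1 then (kv.2, kv.1) else p) (0, "")
      = match PySem.List.max? l (fun kv => kv.2) with
        | none => (0, "")
        | some kv => (kv.2, kv.1) := by
  cases l with
  | nil => rfl
  | cons kv t =>
    rw [pvMax?_cons t kv]
    simp only [List.foldl_cons]
    rw [if_pos (show kv.2 > (0:Int) from hpos kv List.mem_cons_self)]
    exact pvFoldSwap t kv

-- B's step is max? over the pair list
theorem pvAltStep_eq (texts : List String) :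
    pvAltStep texts = PySem.List.max? (pvPairs texts) (fun kv => kv.2) := by
  have h := pvOfList_items (pvPairs texts) (pvPairsKeysNodup texts)
  unfold pvPairs at h
  simp only [pvAltStep, h]
  unfold pvPairs
  rfl

-- one pass of A equals one pass of B
theorem pvBestA_eq_step (texts : List String) :
    (pvGetMemorySaved texts).items.foldl (fun (p : Int × String) kv =>
        if kv.2 > p.1 then (kv.2, kv.1) else p) (0, "")
      = match pvAltStep texts with
        | none => (0, "")
        | some kv => (kv.2, kv.1) := by
  rw [pvMemSaved_items_eq]
  rw [pvAltStep_eq texts]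
  exact pvBest_eq_max? _ (fun kv hkv => by
    unfold pvPairs at hkv
    obtain ⟨p, hp, rfl⟩ := List.mem_map.mp hkv
    have := List.of_mem_filter hp
    simpa using this)

-- every phrase B's max? returns has positive saving
theorem pvStep_pos (texts : List String) (kv : String × Int)
    (h : pvAltStep texts = some kv) : 0 < kv.2 := by
  rw [pvAltStep_eq texts] at h
  have hmem := PySem.List.max?_mem h
  unfold pvPairs at hmem
  obtain ⟨p, hp, rfl⟩ := List.mem_map.mp hmem
  have := List.of_mem_filter hp
  simpa using this

-- B's loop computes A's recursion shifted by the accumulators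
theorem pvAltLoop_eq_pvGoA (fuel : Nat) :
    ∀ (texts : List String) (total : Int) (phases : List String),
      pvAltLoop fuel texts total phases
        = (total + (pvGoA fuel texts).1, (pvGoA fuel texts).2 ++ phases) := by
  induction fuel with
  | zero => intro texts total phases; simp [pvGoA, pvAltLoop]
  | succ fuel ih =>
    intro texts total phases
    simp only [pvGoA, pvAltLoop]
    rw [pvBestA_eq_step texts]
    cases hstep : pvAltStep texts with
    | none => simp
    | some kv =>
      have hpos := pvStep_pos texts kv hstep
      simp only [if_pos (show kv.2 > (0:Int) from hpos)]
      rw [PySem.List.foldl_append_eq_flatMap (fun text =>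
        (PySem.Str.split? text kv.1).getD [text]) texts []]
      rw [ih]
      simp [List.append_assoc, add_assoc]

-- ===== VERDICT (by name: the statement is the Claim_ definition above) =====
theorem greedyCompress_spec : Claim_equal_greedyCompress := by
  intro texts _
  unfold Spec_greedyCompress greedyCompress greedyCompress_alt
  rw [pvAltLoop_eq_pvGoA]
  simp
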